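-- pv_equiv track=rewrite | github.com/vannguyennd/can | units.py | count_correct_end_precision
-- ===== SOURCE A (Python) =====
-- def count_correct_end_precision(p_i_rec, j_rec):
--     c_true = 0
--     c_false = 0
--     for idx, rec in enumerate(j_rec):
--         if int(rec) == 2:
--             if int(p_i_rec[idx]) == 2:
--                 c_true += 1
--             else:
--                 c_false += 1
--     return c_true, c_false
-- ===== SOURCE B (Python) =====
-- def count_correct_end_precision(p_i_rec, j_rec):
--     # Different decomposition: count the denominator (positions with j==2) in one
--     # pass over zipped pairs, count the true hits, and derive c_false = total - c_true.
--     pairs = list(zip(p_i_rec, j_rec))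
--     total = sum(1 for p, j in pairs if int(j) == 2)
--     c_true = sum(1 for p, j in pairs if int(j) == 2 and int(p) == 2)
--     return c_true, total - c_true
-- ===== Notes on version B (the rewrite author's own statement) =====
-- stated objective: alternative
-- what changed: B zips the two lists and computes the totals by counting (total with j==2, c_true with both==2), deriving c_false = total - c_true, instead of A's single indexed loop that increments two counters branch by branch.
import Mathlib
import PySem

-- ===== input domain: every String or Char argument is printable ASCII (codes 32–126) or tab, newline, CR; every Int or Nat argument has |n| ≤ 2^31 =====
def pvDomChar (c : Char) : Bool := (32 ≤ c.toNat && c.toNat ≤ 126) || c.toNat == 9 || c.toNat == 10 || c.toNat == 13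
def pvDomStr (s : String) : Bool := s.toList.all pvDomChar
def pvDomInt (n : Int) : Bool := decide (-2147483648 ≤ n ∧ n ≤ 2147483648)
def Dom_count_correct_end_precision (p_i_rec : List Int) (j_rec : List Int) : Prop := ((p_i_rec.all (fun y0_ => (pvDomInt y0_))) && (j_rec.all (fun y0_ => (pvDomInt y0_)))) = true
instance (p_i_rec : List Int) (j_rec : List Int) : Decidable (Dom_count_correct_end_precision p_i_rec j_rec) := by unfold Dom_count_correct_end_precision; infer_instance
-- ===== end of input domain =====

-- B counts over zipped pairs and derives c_false = total - c_true; alternative decomposition, same cost.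

-- ===== PORT A =====
-- p_i_rec[idx] is ported with pyGetD; Pre_ keeps exactly the inputs where the index is in range (else Python raises IndexError).
def count_correct_end_precision (p_i_rec : List Int) (j_rec : List Int) : Int × Int :=
  (PySem.List.enumerate j_rec 0).foldl
    (fun c ir =>
      if ir.2 = 2 then
        if PySem.List.pyGetD p_i_rec ir.1 0 = 2 then (c.1 + 1, c.2) else (c.1, c.2 + 1)
      else c)
    (0, 0)

-- ===== PORT B =====
def count_correct_end_precision_alt (p_i_rec : List Int) (j_rec : List Int) : Int × Int :=
  let pairs := List.zip p_i_rec j_rec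
  let total : Int := (pairs.countP (fun pj => pj.2 == 2) : Int)
  let c_true : Int := (pairs.countP (fun pj => pj.2 == 2 && pj.1 == 2) : Int)
  (c_true, total - c_true)

-- ===== PRECONDITION & SPEC =====
-- Pre_ excludes exactly the inputs where A raises IndexError: a 2 in j_rec at an index ≥ len(p_i_rec).
def Pre_count_correct_end_precision (p_i_rec : List Int) (j_rec : List Int) : Prop :=
  ∀ p ∈ PySem.List.enumerate j_rec 0, p.2 = 2 → p.1 < (p_i_rec.length : Int)
instance (p_i_rec : List Int) (j_rec : List Int) : Decidable (Pre_count_correct_end_precision p_i_rec j_rec) := by unfold Pre_count_correct_end_precision; infer_instance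
def pvWitness_count_correct_end_precision : List Int × List Int := ([2, 1], [2, 2])

def Spec_count_correct_end_precision (p_i_rec : List Int) (j_rec : List Int) (out : Int × Int) : Prop := out = count_correct_end_precision_alt p_i_rec j_rec
instance (p_i_rec : List Int) (j_rec : List Int) (out : Int × Int) : Decidable (Spec_count_correct_end_precision p_i_rec j_rec out) := by unfold Spec_count_correct_end_precision; infer_instance

-- ===== CLAIM (what is proved, stated in full; the proofs are below) =====
def Claim_equal_count_correct_end_precision : Prop := ∀ (p_i_rec : List Int) (j_rec : List Int), Dom_count_correct_end_precision p_i_rec j_rec → Pre_count_correct_end_precision p_i_rec j_rec → Spec_count_correct_end_precision p_i_rec j_rec (count_correct_end_precision p_i_rec j_rec)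

-- ===== LEMMAS AND PROOFS =====

-- Loop invariant for A's fold: over the suffix of p_i_rec from position s, under the
-- in-range condition, A's fold computes B's two counts added to the accumulator.
theorem ccep_fold_eq (p_i_rec : List Int) :
    ∀ (j : List Int) (s : Nat) (c : Int × Int),
      (∀ (k : Nat) (h : k < j.length), j[k] = 2 → s + k < p_i_rec.length) →
      (PySem.List.enumerate j (s : Int)).foldl
        (fun c ir =>
          if ir.2 = 2 then
            if PySem.List.pyGetD p_i_rec ir.1 0 = 2 then (c.1 + 1, c.2) else (c.1, c.2 + 1)
          else c) c
      = (c.1 + ((List.zip (p_i_rec.drop s) j).countP (fun pj => pj.2 == 2 && pj.1 == 2) : Int),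
         c.2 + (((List.zip (p_i_rec.drop s) j).countP (fun pj => pj.2 == 2) : Int)
                - ((List.zip (p_i_rec.drop s) j).countP (fun pj => pj.2 == 2 && pj.1 == 2) : Int))) := by
  intro j
  induction j with
  | nil => intro s c _; simp [PySem.List.enumerate]
  | cons x j ih =>
    intro s c hpre
    rw [PySem.List.enumerate_cons]
    by_cases hx : x = 2
    · have hs : s < p_i_rec.length := by
        have := hpre 0 (by simp) (by simpa using hx)
        omega
      have hdrop : p_i_rec.drop s = p_i_rec[s] :: p_i_rec.drop (s + 1) :=
        List.drop_eq_getElem_cons hs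
      have hget : PySem.List.pyGetD p_i_rec (s : Int) 0 = p_i_rec[s] := by
        rw [PySem.List.pyGetD_natCast]
        exact List.getD_eq_getElem _ _ hs
      have hpre' : ∀ (k : Nat) (h : k < j.length), j[k] = 2 → (s + 1) + k < p_i_rec.length := by
        intro k hk hjk
        have := hpre (k + 1) (by simp; omega) (by simpa using hjk)
        omega
      have hcast : ((s : Int) + 1) = ((s + 1 : Nat) : Int) := by push_cast; ring
      simp only [List.foldl_cons, hx, if_true, hget, hcast]
      by_cases hp : p_i_rec[s] = 2
      · rw [hp, if_pos rfl, ih (s + 1) _ hpre']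
        simp only [hdrop, List.zip_cons_cons, List.countP_cons]
        norm_num [hp]
        omega
      · rw [if_neg hp, ih (s + 1) _ hpre']
        simp only [hdrop, List.zip_cons_cons, List.countP_cons]
        have hb : (p_i_rec[s] == 2) = false := by simp [hp]
        simp only [hb]
        norm_num
        omega
    · have hpre' : ∀ (k : Nat) (h : k < j.length), j[k] = 2 → (s + 1) + k < p_i_rec.length := by
        intro k hk hjk
        have := hpre (k + 1) (by simp; omega) (by simpa using hjk)
        omega
      have hcast : ((s : Int) + 1) = ((s + 1 : Nat) : Int) := by push_cast; ring
      simp only [List.foldl_cons, hx, if_false, hcast]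
      rw [ih (s + 1) c hpre']
      -- the counts over zip at offset s and s+1 agree since x ≠ 2 contributes nothing
      rcases Nat.lt_or_ge s p_i_rec.length with hs | hs
      · have hdrop : p_i_rec.drop s = p_i_rec[s] :: p_i_rec.drop (s + 1) :=
          List.drop_eq_getElem_cons hs
        simp only [hdrop, List.zip_cons_cons, List.countP_cons]
        have hb : (x == 2) = false := by simp [hx]
        simp [hb]
      · have h1 : p_i_rec.drop s = [] := List.drop_eq_nil_of_le hs
        have h2 : p_i_rec.drop (s + 1) = [] := List.drop_eq_nil_of_le (by omega)
        simp [h1, h2]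

-- ===== VERDICT (by name: the statement is the Claim_ definition above) =====
theorem count_correct_end_precision_spec : Claim_equal_count_correct_end_precision := by
  intro p_i_rec j_rec _ hpre
  unfold Spec_count_correct_end_precision count_correct_end_precision count_correct_end_precision_alt
  have hpre' : ∀ (k : Nat) (h : k < j_rec.length), j_rec[k] = 2 → 0 + k < p_i_rec.length := by
    intro k hk hjk
    have hm : ((0 : Int) + k, j_rec[k]) ∈ PySem.List.enumerate j_rec 0 := by
      rw [PySem.List.mem_enumerate_iff]; exact ⟨k, hk, rfl⟩
    have := hpre _ hm hjk
    simp at this; omega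
  have := ccep_fold_eq p_i_rec j_rec 0 (0, 0) hpre'
  simp only [List.drop_zero, Nat.cast_zero] at this
  rw [this]
  simp
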